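-- pv_equiv track=rewrite | github.com/tyyim/esg_reason | analysis/scripts/hybrid_system_analysis.py | strategy_format_with_gepa_strings
-- ===== SOURCE A (Python) =====
-- from collections import defaultdict
--
-- def strategy_format_with_gepa_strings(test_set, baseline, miprov2, gepa):
--     """Strategy 2: Route by format, but use GEPA for strings (LLM-corrected)."""
--     # Assume GEPA strings with +9 false negatives corrected
--     # GEPA string: 77 correct (ANLS) + 9 (false negatives) = 86 / 211 = 40.7%
--
--     routing = {
--         'Int': 'miprov2',
--         'Float': 'miprov2',
--         'Str': 'gepa',  # Changed to GEPA
--         'List': 'baseline',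
--         'null': 'baseline'
--     }
--
--     correct = 0
--     decisions = defaultdict(int)
--     string_correction = 0
--
--     for i, example in enumerate(test_set):
--         qid = f'q{i}'
--         fmt = example.get('answer_format')
--
--         model = routing.get(fmt, 'baseline')
--         decisions[f'{fmt} -> {model}'] += 1
--
--         if model == 'baseline':
--             if baseline['predictions'][qid].get('correct', False):
--                 correct += 1
--         elif model == 'miprov2':
--             if miprov2['predictions'][qid].get('correct', False):
--                 correct += 1
--         elif model == 'gepa':
--             gepa_correct = gepa['predictions'][qid].get('correct', False)
--             if gepa_correct:
--                 correct += 1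
--             # Simulate LLM correction for strings
--             elif fmt == 'Str' and string_correction < 9:
--                 # Assume we correct some false negatives
--                 # This is a simplification - in reality we'd need LLM eval
--                 # Let's just add the 9 corrections proportionally
--                 string_correction += 1
--                 correct += 1  # Corrected by LLM
--
--     return correct, decisions
-- ===== SOURCE B (Python) =====
-- from collections import defaultdict
--
--
-- def strategy_format_with_gepa_strings(test_set, baseline, miprov2, gepa):
--     """Strategy 2 rewrite: tally decisions, base correctness and string
--     failures in separate passes; apply the 9-correction cap in closed form."""
--     routing = {
--         'Int': 'miprov2',
--         'Float': 'miprov2',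
--         'Str': 'gepa',
--         'List': 'baseline',
--         'null': 'baseline'
--     }
--     models = {'baseline': baseline, 'miprov2': miprov2, 'gepa': gepa}
--
--     routed = [(f'q{i}', ex.get('answer_format')) for i, ex in enumerate(test_set)]
--
--     decisions = defaultdict(int)
--     for qid, fmt in routed:
--         decisions[f'{fmt} -> {routing.get(fmt, "baseline")}'] += 1
--
--     base = sum(1 for qid, fmt in routed
--                if models[routing.get(fmt, 'baseline')]['predictions'][qid].get('correct', False))
--
--     str_fails = sum(1 for qid, fmt in routed
--                     if fmt == 'Str' and not gepa['predictions'][qid].get('correct', False))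
--
--     return base + min(9, str_fails), decisions
-- ===== Notes on version B (the rewrite author's own statement) =====
-- stated objective: simpler
-- what changed: A's single loop over a three-part mutable state (correct, decisions, capped string_correction counter) is replaced by independent passes: a decision tally, a base-correctness count, a count of Str-routed gepa failures, and the 9-correction cap applied in closed form as min(9, fails).
import Mathlib
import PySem

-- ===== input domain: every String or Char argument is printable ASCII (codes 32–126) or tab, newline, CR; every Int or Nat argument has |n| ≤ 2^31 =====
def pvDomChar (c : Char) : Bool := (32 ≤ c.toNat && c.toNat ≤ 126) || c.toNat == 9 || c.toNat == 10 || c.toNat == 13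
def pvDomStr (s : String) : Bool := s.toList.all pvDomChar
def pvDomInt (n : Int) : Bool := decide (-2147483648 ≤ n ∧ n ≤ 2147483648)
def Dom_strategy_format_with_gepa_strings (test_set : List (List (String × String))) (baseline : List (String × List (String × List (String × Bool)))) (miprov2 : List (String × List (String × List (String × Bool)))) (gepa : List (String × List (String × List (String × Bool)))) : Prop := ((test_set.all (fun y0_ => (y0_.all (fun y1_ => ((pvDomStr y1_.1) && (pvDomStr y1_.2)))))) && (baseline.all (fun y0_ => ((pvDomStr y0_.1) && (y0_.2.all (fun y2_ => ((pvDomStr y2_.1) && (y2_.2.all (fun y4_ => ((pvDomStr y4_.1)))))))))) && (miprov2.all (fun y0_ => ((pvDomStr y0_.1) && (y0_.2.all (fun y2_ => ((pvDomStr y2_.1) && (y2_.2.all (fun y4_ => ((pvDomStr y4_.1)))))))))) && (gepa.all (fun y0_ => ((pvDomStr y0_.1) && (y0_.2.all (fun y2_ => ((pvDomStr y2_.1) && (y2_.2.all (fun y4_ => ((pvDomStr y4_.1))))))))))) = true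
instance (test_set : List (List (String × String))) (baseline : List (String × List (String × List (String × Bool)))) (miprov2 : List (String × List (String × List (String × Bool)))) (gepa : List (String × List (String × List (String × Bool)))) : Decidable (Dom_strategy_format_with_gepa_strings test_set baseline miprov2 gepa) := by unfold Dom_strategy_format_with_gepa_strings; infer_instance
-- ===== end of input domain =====

-- B re-implements A's single stateful loop as separate passes (decision tally, base
-- correctness count, string-failure count) with the 9-correction cap applied in closed
-- form via min 9; equal return value on Pre_ (neither version mutates its arguments).

-- ----- shared helpers: sub-expressions both Python versions contain verbatim -----
-- the routing table literal
def pvRouting : PySem.Dict String String :=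
  PySem.Dict.mk [("Int", "miprov2"), ("Float", "miprov2"), ("Str", "gepa"), ("List", "baseline"), ("null", "baseline")]

-- f'{fmt}' where fmt = example.get('answer_format') (None prints as "None")
def pvFmtStr : Option String → String
  | none => "None"
  | some s => s

-- routing.get(fmt, 'baseline'); the None key is never in the table
def pvRouteGet (fmt : Option String) : String :=
  match fmt with
  | none => "baseline"
  | some f => pvRouting.getD f "baseline"

-- model['predictions'][qid].get('correct', False); the two [..] lookups raise KeyError in
-- Python on a missing key — Pre_ excludes exactly those inputs, so the [] defaults are never hit
def pvCorrect (model : List (String × List (String × List (String × Bool)))) (qid : String) : Bool :=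
  (PySem.Dict.mk ((PySem.Dict.mk ((PySem.Dict.mk model).getD "predictions" [])).getD qid [])).getD "correct" false

-- ===== PORT A =====
-- A's loop body over the state (correct, decisions, string_correction)
def pvStepA (baseline miprov2 gepa : List (String × List (String × List (String × Bool))))
    (st : Int × PySem.Dict String Int × Int) (ie : Int × List (String × String)) :
    Int × PySem.Dict String Int × Int :=
  let qid := "q" ++ PySem.Int.toStr ie.1
  let fmt := (PySem.Dict.mk ie.2).get? "answer_format"
  let model := pvRouteGet fmt
  let decisions := st.2.1.modify (pvFmtStr fmt ++ " -> " ++ model) 0 (· + 1)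
  if model == "baseline" then
    (if pvCorrect baseline qid then st.1 + 1 else st.1, decisions, st.2.2)
  else if model == "miprov2" then
    (if pvCorrect miprov2 qid then st.1 + 1 else st.1, decisions, st.2.2)
  else if model == "gepa" then
    let gepa_correct := pvCorrect gepa qid
    if gepa_correct then (st.1 + 1, decisions, st.2.2)
    else if fmt == some "Str" && decide (st.2.2 < 9) then (st.1 + 1, decisions, st.2.2 + 1)
    else (st.1, decisions, st.2.2)
  else (st.1, decisions, st.2.2)

def strategy_format_with_gepa_strings (test_set : List (List (String × String))) (baseline : List (String × List (String × List (String × Bool)))) (miprov2 : List (String × List (String × List (String × Bool)))) (gepa : List (String × List (String × List (String × Bool)))) : Int × (List (String × Int)) :=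
  let r := (PySem.List.enumerate test_set 0).foldl (pvStepA baseline miprov2 gepa)
    ((0 : Int), PySem.Dict.empty, (0 : Int))
  (r.1, r.2.1.items)

-- ===== PORT B =====
def strategy_format_with_gepa_strings_alt (test_set : List (List (String × String))) (baseline : List (String × List (String × List (String × Bool)))) (miprov2 : List (String × List (String × List (String × Bool)))) (gepa : List (String × List (String × List (String × Bool)))) : Int × (List (String × Int)) :=
  -- routed = [(qid, fmt)]; then three independent passes and a closed-form cap
  let routed := (PySem.List.enumerate test_set 0).map
    (fun ie => ("q" ++ PySem.Int.toStr ie.1, (PySem.Dict.mk ie.2).get? "answer_format"))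
  let decisions := routed.foldl
    (fun (d : PySem.Dict String Int) p => d.modify (pvFmtStr p.2 ++ " -> " ++ pvRouteGet p.2) 0 (· + 1))
    PySem.Dict.empty
  let base := routed.foldl
    (fun (a : Int) p =>
      if (if pvRouteGet p.2 == "baseline" then pvCorrect baseline p.1
          else if pvRouteGet p.2 == "miprov2" then pvCorrect miprov2 p.1
          else pvCorrect gepa p.1) then a + 1 else a)
    (0 : Int)
  let str_fails := routed.foldl
    (fun (a : Int) p => if p.2 == some "Str" && !(pvCorrect gepa p.1) then a + 1 else a)
    (0 : Int)
  (base + min 9 str_fails, decisions.items)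

-- ===== PRECONDITION & SPEC =====
-- does model['predictions'][qid] exist (no KeyError)?
def pvHasQ (model : List (String × List (String × List (String × Bool)))) (qid : String) : Bool :=
  match (PySem.Dict.mk model).get? "predictions" with
  | none => false
  | some preds => ((PySem.Dict.mk preds).get? qid).isSome

-- Pre_ excludes exactly the inputs where Python A raises KeyError: each example's routed
-- model dict must have a 'predictions' entry containing that example's qid.
def Pre_strategy_format_with_gepa_strings (test_set : List (List (String × String))) (baseline : List (String × List (String × List (String × Bool)))) (miprov2 : List (String × List (String × List (String × Bool)))) (gepa : List (String × List (String × List (String × Bool)))) : Prop :=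
  ∀ p ∈ PySem.List.enumerate test_set 0,
    (let m := pvRouteGet ((PySem.Dict.mk p.2).get? "answer_format")
     pvHasQ (if m == "baseline" then baseline else if m == "miprov2" then miprov2 else gepa)
       ("q" ++ PySem.Int.toStr p.1)) = true
instance (test_set : List (List (String × String))) (baseline : List (String × List (String × List (String × Bool)))) (miprov2 : List (String × List (String × List (String × Bool)))) (gepa : List (String × List (String × List (String × Bool)))) : Decidable (Pre_strategy_format_with_gepa_strings test_set baseline miprov2 gepa) := by unfold Pre_strategy_format_with_gepa_strings; infer_instance

def pvWitness_strategy_format_with_gepa_strings : (List (List (String × String))) × (List (String × List (String × List (String × Bool)))) × (List (String × List (String × List (String × Bool)))) × (List (String × List (String × List (String × Bool)))) :=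
  ([[("answer_format", "Int")], [("answer_format", "Str")]],
   [("predictions", [("q0", [("correct", true)]), ("q1", [("correct", false)])])],
   [("predictions", [("q0", [("correct", true)]), ("q1", [("correct", false)])])],
   [("predictions", [("q0", [("correct", true)]), ("q1", [("correct", false)])])])

def Spec_strategy_format_with_gepa_strings (test_set : List (List (String × String))) (baseline : List (String × List (String × List (String × Bool)))) (miprov2 : List (String × List (String × List (String × Bool)))) (gepa : List (String × List (String × List (String × Bool)))) (out : Int × (List (String × Int))) : Prop := out = strategy_format_with_gepa_strings_alt test_set baseline miprov2 gepa
instance (test_set : List (List (String × String))) (baseline : List (String × List (String × List (String × Bool)))) (miprov2 : List (String × List (String × List (String × Bool)))) (gepa : List (String × List (String × List (String × Bool)))) (out : Int × (List (String × Int))) : Decidable (Spec_strategy_format_with_gepa_strings test_set baseline miprov2 gepa out) := by unfold Spec_strategy_format_with_gepa_strings; infer_instance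

-- ===== CLAIM (what is proved, stated in full; the proofs are below) =====
def Claim_equal_strategy_format_with_gepa_strings : Prop := ∀ (test_set : List (List (String × String))) (baseline : List (String × List (String × List (String × Bool)))) (miprov2 : List (String × List (String × List (String × Bool)))) (gepa : List (String × List (String × List (String × Bool)))), Dom_strategy_format_with_gepa_strings test_set baseline miprov2 gepa → Pre_strategy_format_with_gepa_strings test_set baseline miprov2 gepa → Spec_strategy_format_with_gepa_strings test_set baseline miprov2 gepa (strategy_format_with_gepa_strings test_set baseline miprov2 gepa)

-- ===== LEMMAS AND PROOFS =====

-- the per-example conditions B counts (B's count lambdas composed with its map, beta-reduced)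
def pvBcond (baseline miprov2 gepa : List (String × List (String × List (String × Bool)))) (ie : Int × List (String × String)) : Bool :=
  if pvRouteGet ((PySem.Dict.mk ie.2).get? "answer_format") == "baseline" then
    pvCorrect baseline ("q" ++ PySem.Int.toStr ie.1)
  else if pvRouteGet ((PySem.Dict.mk ie.2).get? "answer_format") == "miprov2" then
    pvCorrect miprov2 ("q" ++ PySem.Int.toStr ie.1)
  else pvCorrect gepa ("q" ++ PySem.Int.toStr ie.1)

def pvFcond (gepa : List (String × List (String × List (String × Bool)))) (ie : Int × List (String × String)) : Bool :=
  ((PySem.Dict.mk ie.2).get? "answer_format") == some "Str" && !(pvCorrect gepa ("q" ++ PySem.Int.toStr ie.1))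

def pvDecStep (d : PySem.Dict String Int) (ie : Int × List (String × String)) : PySem.Dict String Int :=
  d.modify (pvFmtStr ((PySem.Dict.mk ie.2).get? "answer_format") ++ " -> "
      ++ pvRouteGet ((PySem.Dict.mk ie.2).get? "answer_format")) 0 (· + 1)

lemma pvRoute_cases (fmt : Option String) :
    pvRouteGet fmt = "miprov2" ∨ pvRouteGet fmt = "baseline" ∨ (fmt = some "Str" ∧ pvRouteGet fmt = "gepa") := by
  match fmt with
  | none => simp [pvRouteGet]
  | some f =>
    rcases eq_or_ne f "Int" with h | h1; · subst h; decide
    rcases eq_or_ne f "Float" with h | h2; · subst h; decide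
    rcases eq_or_ne f "Str" with h | h3; · subst h; decide
    rcases eq_or_ne f "List" with h | h4; · subst h; decide
    rcases eq_or_ne f "null" with h | h5; · subst h; decide
    right; left
    simp [pvRouteGet, pvRouting, PySem.Dict.getD_eq_get?_getD,
      h1.symm, h2.symm, h3.symm, h4.symm, h5.symm, PySem.Dict.get?]

-- A's loop from state (c, d, s), s ≤ 9: correct grows by B's base count plus the capped
-- string-failure count; the decisions dict evolves by pvDecStep independently.
lemma pvLoopA (baseline miprov2 gepa : List (String × List (String × List (String × Bool)))) :
    ∀ (l : List (Int × List (String × String))) (c : Int) (d : PySem.Dict String Int) (s : Int), s ≤ 9 →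
    l.foldl (pvStepA baseline miprov2 gepa) (c, d, s)
    = (c + (l.countP (pvBcond baseline miprov2 gepa) : Int)
         + min (9 - s) ((l.countP (pvFcond gepa) : Int)),
       l.foldl pvDecStep d,
       s + min (9 - s) ((l.countP (pvFcond gepa) : Int))) := by
  intro l
  induction l with
  | nil => intro c d s hs; simp; omega
  | cons ie t ih =>
    intro c d s hs
    rw [List.foldl_cons, List.foldl_cons, List.countP_cons, List.countP_cons]
    rcases pvRoute_cases ((PySem.Dict.mk ie.2).get? "answer_format") with hm | hm | ⟨hstr, hm⟩
    · -- routed to miprov2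
      have hb : pvBcond baseline miprov2 gepa ie
          = pvCorrect miprov2 ("q" ++ PySem.Int.toStr ie.1) := by simp [pvBcond, hm]
      have hf : pvFcond gepa ie = false := by
        have hne : ¬ ((PySem.Dict.mk ie.2).get? "answer_format" = some "Str") := by
          intro hfmt; rw [hfmt] at hm; exact absurd hm (by decide)
        simp [pvFcond, hne]
      have hstep : pvStepA baseline miprov2 gepa (c, d, s) ie
          = (if pvCorrect miprov2 ("q" ++ PySem.Int.toStr ie.1) then c + 1 else c,
             pvDecStep d ie, s) := by
        simp [pvStepA, pvDecStep, hm]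
      rw [hstep, ih _ _ _ hs, hb, hf]
      cases hc : pvCorrect miprov2 ("q" ++ PySem.Int.toStr ie.1) <;>
        (simp [Prod.ext_iff]; try omega)
    · -- routed to baseline
      have hb : pvBcond baseline miprov2 gepa ie
          = pvCorrect baseline ("q" ++ PySem.Int.toStr ie.1) := by simp [pvBcond, hm]
      have hf : pvFcond gepa ie = false := by
        have hne : ¬ ((PySem.Dict.mk ie.2).get? "answer_format" = some "Str") := by
          intro hfmt; rw [hfmt] at hm; exact absurd hm (by decide)
        simp [pvFcond, hne]
      have hstep : pvStepA baseline miprov2 gepa (c, d, s) ie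
          = (if pvCorrect baseline ("q" ++ PySem.Int.toStr ie.1) then c + 1 else c,
             pvDecStep d ie, s) := by
        simp [pvStepA, pvDecStep, hm]
      rw [hstep, ih _ _ _ hs, hb, hf]
      cases hc : pvCorrect baseline ("q" ++ PySem.Int.toStr ie.1) <;>
        (simp [Prod.ext_iff]; try omega)
    · -- routed to gepa, fmt = some "Str"
      have hb : pvBcond baseline miprov2 gepa ie
          = pvCorrect gepa ("q" ++ PySem.Int.toStr ie.1) := by simp [pvBcond, hm]
      have hf : pvFcond gepa ie = !(pvCorrect gepa ("q" ++ PySem.Int.toStr ie.1)) := by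
        simp [pvFcond, hstr]
      have hg : pvRouteGet (some "Str") = "gepa" := by decide
      cases hc : pvCorrect gepa ("q" ++ PySem.Int.toStr ie.1) with
      | true =>
        have hstep : pvStepA baseline miprov2 gepa (c, d, s) ie = (c + 1, pvDecStep d ie, s) := by
          simp [pvStepA, pvDecStep, hstr, hg, hc]
        rw [hstep, ih _ _ _ hs, hb, hf, hc]
        (simp [Prod.ext_iff]; try omega)
      | false =>
        by_cases hs9 : s < 9
        · have hstep : pvStepA baseline miprov2 gepa (c, d, s) ie
              = (c + 1, pvDecStep d ie, s + 1) := by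
            simp [pvStepA, pvDecStep, hstr, hg, hc, hs9]
          rw [hstep, ih _ _ _ (by omega), hb, hf, hc]
          (simp [Prod.ext_iff]; try omega)
        · have hstep : pvStepA baseline miprov2 gepa (c, d, s) ie
              = (c, pvDecStep d ie, s) := by
            simp [pvStepA, pvDecStep, hstr, hg, hc, hs9]
          rw [hstep, ih _ _ _ hs, hb, hf, hc]
          (simp [Prod.ext_iff]; try omega)

-- ===== VERDICT (by name: the statement is the Claim_ definition above) =====
theorem strategy_format_with_gepa_strings_spec : Claim_equal_strategy_format_with_gepa_strings := by
  intro test_set baseline miprov2 gepa _ _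
  unfold Spec_strategy_format_with_gepa_strings
  unfold strategy_format_with_gepa_strings strategy_format_with_gepa_strings_alt
  rw [pvLoopA baseline miprov2 gepa _ 0 PySem.Dict.empty 0 (by norm_num)]
  simp only [List.foldl_map, PySem.List.foldl_count_if]
  congr 1
  unfold pvBcond pvFcond
  push_cast
  omega
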